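-- pv_equiv track=rewrite | github.com/inwpuun/band-protocol | boss-baby-revenge/problem1.py | boss_baby_revenge
-- ===== SOURCE A (Python) =====
-- def boss_baby_revenge(s: str) -> str:
--     # if boss baby initiate shots at the neighborhood kids first then he is bad boy
--     if s[0] == "R":
--         return "Bad boy"
--
--     counter = 0
--     for i in range(len(s)):
--         if s[i] == "S":
--             counter += 1
--         else:
--             # do not care if boss baby shot more than the kids
--             if counter == 0 :
--                 continue
--             counter -= 1
--
--     # all the shots have been revenged
--     if counter == 0:
--         return "Good boy"
--
--     return "Bad boy"
-- ===== SOURCE B (Python) =====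
-- def boss_baby_revenge(s: str) -> str:
--     if s[0] == "R":
--         return "Bad boy"
--     bal = 0   # raw running balance: +1 per 'S', -1 per anything else
--     low = 0   # minimum prefix balance seen so far
--     for c in s:
--         bal += 1 if c == "S" else -1
--         if bal < low:
--             low = bal
--     # unmatched 'S' count = bal - low; zero iff bal == low
--     return "Good boy" if bal == low else "Bad boy"
-- ===== Notes on version B (the rewrite author's own statement) =====
-- stated objective: alternative
-- what changed: Replaces the per-step clamped counter simulation by one pass computing the raw running balance and its minimum prefix value, deciding algebraically via bal == low instead of clamping at zero each step.
import Mathlib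
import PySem

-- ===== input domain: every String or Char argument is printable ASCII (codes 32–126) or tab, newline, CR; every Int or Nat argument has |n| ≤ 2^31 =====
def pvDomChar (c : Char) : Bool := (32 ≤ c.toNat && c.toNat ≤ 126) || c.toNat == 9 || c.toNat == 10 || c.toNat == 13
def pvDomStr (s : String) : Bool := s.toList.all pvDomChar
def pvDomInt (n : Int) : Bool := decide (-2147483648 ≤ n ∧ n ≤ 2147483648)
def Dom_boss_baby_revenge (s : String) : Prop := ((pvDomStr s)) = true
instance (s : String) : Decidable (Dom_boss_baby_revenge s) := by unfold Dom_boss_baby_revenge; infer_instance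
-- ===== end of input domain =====

-- B replaces A's per-step clamped counter by raw balance + minimum-prefix statistics
-- decided algebraically (bal == low); alternative decomposition, same cost.

-- ===== PORT A =====
def boss_baby_revenge (s : String) : String :=
  if PySem.Str.pyGet? s 0 = some 'R' then "Bad boy"
  else
    let counter : Int :=
      (PySem.List.pyRange 0 (PySem.Str.len s) 1).foldl
        (fun (c : Int) i =>
          if PySem.List.pyGetD s.toList i ' ' = 'S' then c + 1
          else if c = 0 then c else c - 1) 0
    if counter = 0 then "Good boy" else "Bad boy"

-- ===== PORT B =====
def boss_baby_revenge_alt (s : String) : String :=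
  if PySem.Str.pyGet? s 0 = some 'R' then "Bad boy"
  else
    let p : Int × Int :=
      s.toList.foldl
        (fun (p : Int × Int) c =>
          let bal := p.1 + (if c = 'S' then 1 else -1)
          (bal, if bal < p.2 then bal else p.2)) (0, 0)
    if p.1 = p.2 then "Good boy" else "Bad boy"

-- ===== PRECONDITION & SPEC =====
-- A (and B) raise IndexError on the empty string via s[0]; exclude exactly that input.
def Pre_boss_baby_revenge (s : String) : Prop := s ≠ ""
instance (s : String) : Decidable (Pre_boss_baby_revenge s) := by unfold Pre_boss_baby_revenge; infer_instance
def pvWitness_boss_baby_revenge : String := "SSRR"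

def Spec_boss_baby_revenge (s : String) (out : String) : Prop := out = boss_baby_revenge_alt s
instance (s : String) (out : String) : Decidable (Spec_boss_baby_revenge s out) := by unfold Spec_boss_baby_revenge; infer_instance

-- ===== CLAIM (what is proved, stated in full; the proofs are below) =====
def Claim_equal_boss_baby_revenge : Prop := ∀ (s : String), Dom_boss_baby_revenge s → Pre_boss_baby_revenge s → Spec_boss_baby_revenge s (boss_baby_revenge s)

-- ===== LEMMAS AND PROOFS =====

-- A's clamped counter equals raw balance minus minimum prefix balance.
theorem clamp_eq_bal_sub_low (l : List Char) : ∀ (bal low : Int), low ≤ bal →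
    l.foldl (fun (c : Int) ch =>
        if ch = 'S' then c + 1 else if c = 0 then c else c - 1) (bal - low)
      = (l.foldl (fun (p : Int × Int) c =>
          let bal := p.1 + (if c = 'S' then 1 else -1)
          (bal, if bal < p.2 then bal else p.2)) (bal, low)).1
        - (l.foldl (fun (p : Int × Int) c =>
          let bal := p.1 + (if c = 'S' then 1 else -1)
          (bal, if bal < p.2 then bal else p.2)) (bal, low)).2 := by
  induction l with
  | nil => intro bal low _; simp
  | cons ch t ih =>
    intro bal low h
    simp only [List.foldl_cons]
    by_cases hS : ch = 'S'
    · simp only [hS, if_pos rfl]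
      have : bal - low + 1 = bal + 1 - low := by ring
      rw [this]
      have hlt : ¬ (bal + 1 < low) := by omega
      simpa [hlt] using ih (bal + 1) low (by omega)
    · simp only [hS, if_neg hS, if_false]
      by_cases hz : bal - low = 0
      · have hb : bal = low := by omega
        have hlt : bal + -1 < low := by omega
        rw [if_pos hz]
        have : bal - low = (bal - 1) - (bal - 1) := by omega
        rw [this]
        simpa [hb, hlt, sub_eq_add_neg] using ih (bal - 1) (bal - 1) (by omega)
      · have hlt : ¬ (bal + -1 < low) := by omega
        rw [if_neg hz]
        have : bal - low - 1 = (bal - 1) - low := by ring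
        rw [this]
        simpa [hlt, sub_eq_add_neg] using ih (bal - 1) low (by omega)

-- ===== VERDICT (by name: the statement is the Claim_ definition above) =====
theorem boss_baby_revenge_spec : Claim_equal_boss_baby_revenge := by
  intro s _ _
  unfold Spec_boss_baby_revenge boss_baby_revenge boss_baby_revenge_alt
  by_cases hR : PySem.Str.pyGet? s 0 = some 'R'
  · rw [if_pos hR, if_pos hR]
  · rw [if_neg hR, if_neg hR]
    have hc : (PySem.List.pyRange 0 (PySem.Str.len s) 1).foldl
        (fun (c : Int) i =>
          if PySem.List.pyGetD s.toList i ' ' = 'S' then c + 1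
          else if c = 0 then c else c - 1) 0
        = s.toList.foldl
            (fun (c : Int) ch => if ch = 'S' then c + 1 else if c = 0 then c else c - 1) 0 := by
      simp only [PySem.Str.len_eq]
      rw [PySem.List.foldl_pyRange_zero_pyGetD' s.toList ' '
        (fun (c : Int) ch => if ch = 'S' then c + 1 else if c = 0 then c else c - 1) 0]
    have h := clamp_eq_bal_sub_low s.toList 0 0 (le_refl 0)
    simp only [sub_zero] at h
    refine if_congr ?_ rfl rfl
    rw [hc, h]
    exact sub_eq_zero
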